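-- pv_equiv track=rewrite | github.com/UKPLab/naacl2025-cove | src/evaluation/evaluation_metrics.py | find_locations_to_remove
-- ===== SOURCE A (Python) =====
-- def is_strict_subset(sublist, mainlist):
--     '''
--     Compute whether the content of one list is the subset of the content of another list.
--     '''
--     return set(sublist).issubset(set(mainlist)) and len(sublist) < len(mainlist)
--
-- def find_locations_to_remove(l):
--     '''
--     Remove locations for which the hierarchy is a strict subset of another location.
--     '''
--     indices_to_remove = []
--
--     def contains_strict_subset(outer_list, other_lists):
--         for sublist in outer_list:
--             for other_list in other_lists:
--                 for other_sublist in other_list: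
--                     if is_strict_subset(sublist, other_sublist):
--                         return True
--         return False
--
--     for i, outer_list in enumerate(l):
--         if contains_strict_subset(outer_list, [other_list for j, other_list in enumerate(l) if i != j]):
--             indices_to_remove.append(i)
--
--     return indices_to_remove
-- ===== SOURCE B (Python) =====
-- def find_locations_to_remove(l):
--     # Deduplicate sublists into canonical keys (sorted distinct elements, original length),
--     # attach owner-index sets, compute per-key dominator-index sets once, then read off
--     # removable indices -- instead of A's per-index rescan of all other lists.
--     owners = {}
--     for i, outer in enumerate(l):
--         for s in outer:
--             k = (tuple(sorted(set(s))), len(s))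
--             owners.setdefault(k, set()).add(i)
--     dom = {}
--     for k in owners:
--         d = set()
--         for k2, own2 in owners.items():
--             if set(k[0]) <= set(k2[0]) and k[1] < k2[1]:
--                 d |= own2
--         dom[k] = d
--     return [i for i in range(len(l))
--             if any(i in own and (dom[k] - {i}) for k, own in owners.items())]
-- ===== Notes on version B (the rewrite author's own statement) =====
-- stated objective: alternative
-- what changed: B deduplicates all sublists into canonical (sorted-distinct-elements, original-length) keys in a dict mapping each key to its set of owner indices, computes for each distinct key once the set of indices owning a strictly dominating key, and then reads off as removable every index that owns a key dominated from some other index - instead of A's per-index rebuild of the other lists and triple-nested rescan with early return.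
import Mathlib
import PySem

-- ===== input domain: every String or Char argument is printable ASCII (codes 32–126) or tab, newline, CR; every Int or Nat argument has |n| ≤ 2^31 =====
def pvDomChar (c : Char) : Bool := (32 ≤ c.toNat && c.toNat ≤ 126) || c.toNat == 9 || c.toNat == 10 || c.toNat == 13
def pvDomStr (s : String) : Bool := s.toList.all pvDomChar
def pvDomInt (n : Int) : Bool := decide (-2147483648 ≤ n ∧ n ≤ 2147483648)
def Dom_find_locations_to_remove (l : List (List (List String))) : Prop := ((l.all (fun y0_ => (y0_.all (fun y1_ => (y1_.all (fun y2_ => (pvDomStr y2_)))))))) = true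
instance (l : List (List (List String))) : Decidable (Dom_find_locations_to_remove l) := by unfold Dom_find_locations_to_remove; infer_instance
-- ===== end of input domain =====

-- B deduplicates sublists into canonical (sorted-distinct-elements, length) keys with owner-index
-- sets, computes a dominator-index set per distinct key once, and reads off the removable indices,
-- instead of A's per-index rescan of all other lists (alternative algorithm, not claimed faster).

-- ===== PORT A =====
def is_strict_subset (sublist mainlist : List String) : Bool :=
  PySem.Set.issubset (PySem.Set.ofList sublist) (PySem.Set.ofList mainlist)
    && decide (sublist.length < mainlist.length)

def contains_strict_subset (outer_list : List (List String))
    (other_lists : List (List (List String))) : Bool :=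
  outer_list.any (fun sublist =>
    other_lists.any (fun other_list =>
      other_list.any (fun other_sublist =>
        is_strict_subset sublist other_sublist)))

def find_locations_to_remove (l : List (List (List String))) : List Int :=
  (PySem.List.enumerate l).foldl (fun acc p =>
    if contains_strict_subset p.2
        (((PySem.List.enumerate l).filter (fun q => decide (p.1 ≠ q.1))).map (fun q => q.2))
    then acc ++ [p.1] else acc) []

-- ===== PORT B =====
def find_locations_to_remove_alt (l : List (List (List String))) : List Int :=
  let owners : PySem.Dict (List String × Int) (PySem.Set Int) :=
    (PySem.List.enumerate l).foldl (fun d p =>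
      p.2.foldl (fun d s =>
        d.modify (PySem.List.sorted (PySem.Set.ofList s) (fun x => x) false, (s.length : Int))
          PySem.Set.empty (fun st => PySem.Set.add st p.1)) d) PySem.Dict.empty
  let dom : PySem.Dict (List String × Int) (PySem.Set Int) :=
    owners.keys.foldl (fun dm k =>
      dm.insert k (owners.items.foldl (fun d q2 =>
        if PySem.Set.issubset (PySem.Set.ofList k.1) (PySem.Set.ofList q2.1.1) = true ∧ k.2 < q2.1.2
        then PySem.Set.union d q2.2 else d) PySem.Set.empty)) PySem.Dict.empty
  (PySem.List.pyRange 0 (l.length : Int) 1).filter (fun i =>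
    owners.items.any (fun q =>
      PySem.Set.contains q.2 i
        && decide (PySem.Set.diff (dom.getD q.1 PySem.Set.empty) [i] ≠ [])))

-- ===== PRECONDITION & SPEC =====
def Spec_find_locations_to_remove (l : List (List (List String))) (out : List Int) : Prop := out = find_locations_to_remove_alt l
instance (l : List (List (List String))) (out : List Int) : Decidable (Spec_find_locations_to_remove l out) := by unfold Spec_find_locations_to_remove; infer_instance

-- ===== CLAIM (what is proved, stated in full; the proofs are below) =====
def Claim_equal_find_locations_to_remove : Prop := ∀ (l : List (List (List String))), Dom_find_locations_to_remove l → Spec_find_locations_to_remove l (find_locations_to_remove l)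

-- ===== LEMMAS AND PROOFS =====

-- A's per-index condition, as a predicate on an enumerate pair
def pvCondA (l : List (List (List String))) (p : Int × List (List String)) : Bool :=
  contains_strict_subset p.2
    (((PySem.List.enumerate l).filter (fun q => decide (p.1 ≠ q.1))).map (fun q => q.2))

theorem findA_eq_filter (l : List (List (List String))) :
    find_locations_to_remove l =
      (((PySem.List.enumerate l).filter (pvCondA l)).map (fun p => p.1)) := by
  show List.foldl (fun acc p => if pvCondA l p = true then acc ++ [p.1] else acc) []
      (PySem.List.enumerate l) = _
  rw [PySem.List.foldl_append_if (pvCondA l) (fun p => p.1)]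
  simp

-- B-side abbreviations (the let-bound locals of the port, as top-level proof helpers)
def pvKey (s : List String) : List String × Int :=
  (PySem.List.sorted (PySem.Set.ofList s) (fun x => x) false, (s.length : Int))

def pvPairs (l : List (List (List String))) : List (Int × List String) :=
  (PySem.List.enumerate l).flatMap (fun p => p.2.map (fun s => (p.1, s)))

def pvOwners (l : List (List (List String))) : PySem.Dict (List String × Int) (PySem.Set Int) :=
  (pvPairs l).foldl (fun d q =>
    d.modify (pvKey q.2) PySem.Set.empty (fun st => PySem.Set.add st q.1)) PySem.Dict.empty

def pvD (l : List (List (List String))) (k : List String × Int) : PySem.Set Int :=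
  (pvOwners l).items.foldl (fun d q2 =>
    if PySem.Set.issubset (PySem.Set.ofList k.1) (PySem.Set.ofList q2.1.1) = true ∧ k.2 < q2.1.2
    then PySem.Set.union d q2.2 else d) PySem.Set.empty

def pvDdict (l : List (List (List String))) : PySem.Dict (List String × Int) (PySem.Set Int) :=
  (pvOwners l).keys.foldl (fun dm k => dm.insert k (pvD l k)) PySem.Dict.empty

def pvCondB (l : List (List (List String))) (i : Int) : Bool :=
  (pvOwners l).items.any (fun q =>
    PySem.Set.contains q.2 i
      && decide (PySem.Set.diff ((pvDdict l).getD q.1 PySem.Set.empty) [i] ≠ []))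

theorem pvOwners_eq (l : List (List (List String))) :
    (PySem.List.enumerate l).foldl (fun d p =>
      p.2.foldl (fun d s =>
        d.modify (PySem.List.sorted (PySem.Set.ofList s) (fun x => x) false, (s.length : Int))
          PySem.Set.empty (fun st => PySem.Set.add st p.1)) d) PySem.Dict.empty = pvOwners l := by
  unfold pvOwners pvPairs pvKey
  rw [List.foldl_flatMap]
  simp [List.foldl_map]

theorem pvAlt_eq (l : List (List (List String))) :
    find_locations_to_remove_alt l =
      (PySem.List.pyRange 0 (l.length : Int) 1).filter (pvCondB l) := by
  unfold find_locations_to_remove_alt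
  rw [pvOwners_eq]
  rfl

-- membership in the owners dict's value at a key
theorem pvMem_getD_owners_aux (qs : List (Int × List String))
    (d : PySem.Dict (List String × Int) (PySem.Set Int)) (k : List String × Int) (j : Int) :
    (j ∈ (qs.foldl (fun d q =>
        d.modify (pvKey q.2) PySem.Set.empty (fun st => PySem.Set.add st q.1)) d).getD k PySem.Set.empty) ↔
      j ∈ d.getD k PySem.Set.empty ∨ ∃ q ∈ qs, pvKey q.2 = k ∧ q.1 = j := by
  induction qs generalizing d with
  | nil => simp
  | cons a qs ih =>
      simp only [List.foldl_cons]
      rw [ih, PySem.Dict.getD_modify]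
      by_cases h : k = pvKey a.2
      · subst h
        rw [if_pos rfl, PySem.Set.mem_add]
        constructor
        · rintro ((hj | hj) | ⟨q, hq, hk, hj⟩)
          · exact Or.inl hj
          · exact Or.inr ⟨a, List.mem_cons_self, rfl, hj.symm⟩
          · exact Or.inr ⟨q, List.mem_cons_of_mem _ hq, hk, hj⟩
        · rintro (hj | ⟨q, hq, hk, hj⟩)
          · exact Or.inl (Or.inl hj)
          · rcases List.mem_cons.mp hq with rfl | hq
            · exact Or.inl (Or.inr hj.symm)
            · exact Or.inr ⟨q, hq, hk, hj⟩
      · rw [if_neg h]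
        constructor
        · rintro (hj | ⟨q, hq, hk, hj⟩)
          · exact Or.inl hj
          · exact Or.inr ⟨q, List.mem_cons_of_mem _ hq, hk, hj⟩
        · rintro (hj | ⟨q, hq, hk, hj⟩)
          · exact Or.inl hj
          · rcases List.mem_cons.mp hq with rfl | hq
            · exact absurd hk.symm h
            · exact Or.inr ⟨q, hq, hk, hj⟩

theorem pvMem_getD_owners (l : List (List (List String))) (k : List String × Int) (j : Int) :
    j ∈ (pvOwners l).getD k PySem.Set.empty ↔ ∃ q ∈ pvPairs l, pvKey q.2 = k ∧ q.1 = j := by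
  unfold pvOwners
  rw [pvMem_getD_owners_aux]
  simp [PySem.Set.empty]

theorem pvKeys_owners (l : List (List (List String))) :
    (pvOwners l).keys = PySem.Set.ofList ((pvPairs l).map (fun q => pvKey q.2)) := by
  unfold pvOwners
  rw [PySem.Dict.keys_foldl_modify_key]
  simp [PySem.Set.update_nil_left]

theorem pvNodup_keys (l : List (List (List String))) : (pvOwners l).keys.Nodup := by
  rw [pvKeys_owners]; exact PySem.Set.nodup_ofList _

theorem pvMem_keys_owners (l : List (List (List String))) (k : List String × Int) :
    k ∈ (pvOwners l).keys ↔ ∃ q ∈ pvPairs l, pvKey q.2 = k := by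
  rw [pvKeys_owners, PySem.Set.mem_ofList]
  simp

theorem pvMem_items_owners (l : List (List (List String))) (k : List String × Int)
    (own : PySem.Set Int) :
    (k, own) ∈ (pvOwners l).items ↔
      k ∈ (pvOwners l).keys ∧ own = (pvOwners l).getD k PySem.Set.empty := by
  constructor
  · intro h
    exact ⟨PySem.Dict.mem_keys_of_mem_items _ h,
      (PySem.Dict.getD_of_mem_items _ h (pvNodup_keys l) PySem.Set.empty).symm⟩
  · rintro ⟨hk, rfl⟩
    rw [PySem.Dict.items_eq_map_keys _ (pvNodup_keys l) PySem.Set.empty]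
    exact List.mem_map_of_mem hk

theorem pvItems_ddict (l : List (List (List String))) :
    (pvDdict l).items = (pvOwners l).keys.map (fun k => (k, pvD l k)) := by
  unfold pvDdict
  have h := PySem.Dict.items_foldl_insert_fresh (l := (pvOwners l).keys)
      (k := fun x => x) (v := pvD l) (d := PySem.Dict.empty)
      (by intro a _; simp [PySem.Dict.contains_empty]) (by simpa using pvNodup_keys l)
  simpa using h

theorem pvNodup_keys_ddict (l : List (List (List String))) : (pvDdict l).keys.Nodup := by
  unfold pvDdict
  exact PySem.Dict.nodup_keys_foldl_insert _ _ _ PySem.Dict.nodup_keys_empty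

theorem pvGetD_ddict (l : List (List (List String))) (k : List String × Int)
    (hk : k ∈ (pvOwners l).keys) :
    (pvDdict l).getD k PySem.Set.empty = pvD l k := by
  refine PySem.Dict.getD_of_mem_items _ ?_ (pvNodup_keys_ddict l) PySem.Set.empty
  rw [pvItems_ddict]
  exact List.mem_map_of_mem hk

theorem pvMem_pvD_aux (k : List String × Int)
    (qs : List ((List String × Int) × PySem.Set Int)) (j : Int) :
    ∀ acc : PySem.Set Int,
      (j ∈ qs.foldl (fun d q2 =>
        if PySem.Set.issubset (PySem.Set.ofList k.1) (PySem.Set.ofList q2.1.1) = true ∧ k.2 < q2.1.2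
        then PySem.Set.union d q2.2 else d) acc) ↔
        j ∈ acc ∨ ∃ q2 ∈ qs,
          (PySem.Set.issubset (PySem.Set.ofList k.1) (PySem.Set.ofList q2.1.1) = true ∧ k.2 < q2.1.2)
            ∧ j ∈ q2.2 := by
  induction qs with
  | nil => simp
  | cons a qs ih =>
      intro acc
      simp only [List.foldl_cons]
      rw [ih]
      by_cases h : PySem.Set.issubset (PySem.Set.ofList k.1) (PySem.Set.ofList a.1.1) = true ∧ k.2 < a.1.2
      · rw [if_pos h, PySem.Set.mem_union]
        constructor
        · rintro ((hj | hj) | ⟨q2, hq2, hc, hj⟩)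
          · exact Or.inl hj
          · exact Or.inr ⟨a, List.mem_cons_self, h, hj⟩
          · exact Or.inr ⟨q2, List.mem_cons_of_mem _ hq2, hc, hj⟩
        · rintro (hj | ⟨q2, hq2, hc, hj⟩)
          · exact Or.inl (Or.inl hj)
          · rcases List.mem_cons.mp hq2 with rfl | hq2
            · exact Or.inl (Or.inr hj)
            · exact Or.inr ⟨q2, hq2, hc, hj⟩
      · rw [if_neg h]
        constructor
        · rintro (hj | ⟨q2, hq2, hc, hj⟩)
          · exact Or.inl hj
          · exact Or.inr ⟨q2, List.mem_cons_of_mem _ hq2, hc, hj⟩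
        · rintro (hj | ⟨q2, hq2, hc, hj⟩)
          · exact Or.inl hj
          · rcases List.mem_cons.mp hq2 with rfl | hq2
            · exact absurd hc h
            · exact Or.inr ⟨q2, hq2, hc, hj⟩

theorem pvMem_pvD (l : List (List (List String))) (k : List String × Int) (j : Int) :
    j ∈ pvD l k ↔ ∃ q2 ∈ (pvOwners l).items,
      (PySem.Set.issubset (PySem.Set.ofList k.1) (PySem.Set.ofList q2.1.1) = true ∧ k.2 < q2.1.2)
        ∧ j ∈ q2.2 := by
  unfold pvD
  rw [pvMem_pvD_aux]
  simp [PySem.Set.empty]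

theorem pvMem_pairs (l : List (List (List String))) (q : Int × List String) :
    q ∈ pvPairs l ↔ ∃ p ∈ PySem.List.enumerate l, ∃ s ∈ p.2, q = (p.1, s) := by
  unfold pvPairs
  simp only [List.mem_flatMap, List.mem_map]
  constructor
  · rintro ⟨p, hp, s, hs, rfl⟩; exact ⟨p, hp, s, hs, rfl⟩
  · rintro ⟨p, hp, s, hs, rfl⟩; exact ⟨p, hp, s, hs, rfl⟩

-- content of a canonical key = content of the sublist
theorem pvMem_key_fst (s : List String) (x : String) : x ∈ (pvKey s).1 ↔ x ∈ s := by
  unfold pvKey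
  rw [(PySem.List.sorted_perm _ _ _).mem_iff, PySem.Set.mem_ofList]

theorem pvKey_subset_iff (s t : List String) :
    (PySem.Set.issubset (PySem.Set.ofList (pvKey s).1) (PySem.Set.ofList (pvKey t).1) = true)
      ↔ PySem.Set.issubset (PySem.Set.ofList s) (PySem.Set.ofList t) = true := by
  rw [PySem.Set.issubset_iff, PySem.Set.issubset_iff]
  constructor <;> intro h x hx
  · have := h x (by rw [PySem.Set.mem_ofList, pvMem_key_fst]; exact (PySem.Set.mem_ofList _ _).mp hx)
    rw [PySem.Set.mem_ofList, pvMem_key_fst] at this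
    rw [PySem.Set.mem_ofList]
    exact this
  · have := h x (by rw [PySem.Set.mem_ofList]; rw [PySem.Set.mem_ofList, pvMem_key_fst] at hx; exact hx)
    rw [PySem.Set.mem_ofList] at this
    rw [PySem.Set.mem_ofList, pvMem_key_fst]
    exact this

-- the index of an enumerate pair determines the pair
theorem pvEnum_inj (l : List (List (List String))) {p p' : Int × List (List String)}
    (hp : p ∈ PySem.List.enumerate l) (hp' : p' ∈ PySem.List.enumerate l)
    (h : p.1 = p'.1) : p = p' := by
  have hn : ((PySem.List.enumerate l).map (fun q => q.1)).Nodup := by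
    have hpl : ((PySem.List.enumerate l).map (fun q => q.1)).Pairwise (· < ·) :=
      List.Pairwise.map _ (fun a b hab => hab) (PySem.List.pairwise_lt_enumerate (xs := l) (s := 0))
    exact hpl.imp (fun hlt => by omega) |>.nodup
  exact List.inj_on_of_nodup_map hn hp hp' h

-- the common semantic reading of both per-index conditions
def pvSem (l : List (List (List String))) (i : Int) : Prop :=
  ∃ p ∈ PySem.List.enumerate l, p.1 = i ∧ ∃ s ∈ p.2, ∃ q ∈ PySem.List.enumerate l, i ≠ q.1 ∧
    ∃ t ∈ q.2, PySem.Set.issubset (PySem.Set.ofList s) (PySem.Set.ofList t) = true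
      ∧ s.length < t.length

theorem pvCondA_iff (l : List (List (List String))) (p : Int × List (List String))
    (hp : p ∈ PySem.List.enumerate l) : pvCondA l p = true ↔ pvSem l p.1 := by
  unfold pvCondA contains_strict_subset is_strict_subset pvSem
  simp only [List.any_eq_true, List.mem_map, List.mem_filter, decide_eq_true_eq,
    Bool.and_eq_true]
  constructor
  · rintro ⟨sub, hsub, ol, ⟨q, ⟨hq, hne⟩, rfl⟩, osub, hosub, hss, hlen⟩
    exact ⟨p, hp, rfl, sub, hsub, q, hq, hne, osub, hosub, hss, hlen⟩
  · rintro ⟨p', hp', hpi, s, hs, q, hq, hne, t, ht, hss, hlen⟩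
    have : p' = p := pvEnum_inj l hp' hp hpi
    subst this
    exact ⟨s, hs, q.2, ⟨q, ⟨hq, hne⟩, rfl⟩, t, ht, hss, hlen⟩

theorem pvCondB_iff (l : List (List (List String))) (i : Int) :
    pvCondB l i = true ↔ pvSem l i := by
  unfold pvCondB
  simp only [List.any_eq_true, Bool.and_eq_true, decide_eq_true_eq]
  constructor
  · rintro ⟨⟨k, own⟩, hitem, hin, hdiff⟩
    obtain ⟨hk, rfl⟩ := (pvMem_items_owners l k own).mp hitem
    obtain ⟨q, hq, hkey, hqi⟩ := (pvMem_getD_owners l k i).mp ((PySem.Set.contains_iff _ _).mp hin)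
    obtain ⟨p, hp, s, hs, hqe⟩ := (pvMem_pairs l q).mp hq
    rw [pvGetD_ddict l k hk] at hdiff
    obtain ⟨j, hjd⟩ := List.exists_mem_of_ne_nil _ hdiff
    rw [PySem.Set.mem_diff] at hjd
    have hji : j ≠ i := by have := hjd.2; simpa using this
    obtain ⟨⟨k2, own2⟩, hitem2, hcond, hjown2⟩ := (pvMem_pvD l k j).mp hjd.1
    obtain ⟨hk2, rfl⟩ := (pvMem_items_owners l k2 own2).mp hitem2
    obtain ⟨q2, hq2, hkey2, hq2j⟩ := (pvMem_getD_owners l k2 j).mp hjown2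
    obtain ⟨p2, hp2, t, ht, hq2e⟩ := (pvMem_pairs l q2).mp hq2
    have hpi : p.1 = i := by rw [hqe] at hqi; exact hqi
    have hkeys : pvKey s = k := by rw [hqe] at hkey; exact hkey
    have hp2j : p2.1 = j := by rw [hq2e] at hq2j; exact hq2j
    have hkeyt : pvKey t = k2 := by rw [hq2e] at hkey2; exact hkey2
    have hcond1 : PySem.Set.issubset (PySem.Set.ofList k.1) (PySem.Set.ofList k2.1) = true := hcond.1
    have hcond2 : k.2 < k2.2 := hcond.2
    rw [← hkeys, ← hkeyt] at hcond1 hcond2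
    refine ⟨p, hp, hpi, s, hs, p2, hp2, ?_, t, ht, ?_, ?_⟩
    · intro he
      exact hji ((he.trans hp2j).symm)
    · exact (pvKey_subset_iff s t).mp hcond1
    · simp only [pvKey] at hcond2
      exact_mod_cast hcond2
  · rintro ⟨p, hp, hpi, s, hs, q, hq, hne, t, ht, hss, hlen⟩
    have hpair : (p.1, s) ∈ pvPairs l := (pvMem_pairs l _).mpr ⟨p, hp, s, hs, rfl⟩
    have hpair2 : (q.1, t) ∈ pvPairs l := (pvMem_pairs l _).mpr ⟨q, hq, t, ht, rfl⟩
    have hk : pvKey s ∈ (pvOwners l).keys :=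
      (pvMem_keys_owners l _).mpr ⟨(p.1, s), hpair, rfl⟩
    have hk2 : pvKey t ∈ (pvOwners l).keys :=
      (pvMem_keys_owners l _).mpr ⟨(q.1, t), hpair2, rfl⟩
    refine ⟨(pvKey s, (pvOwners l).getD (pvKey s) PySem.Set.empty),
      (pvMem_items_owners l _ _).mpr ⟨hk, rfl⟩, ?_, ?_⟩
    · rw [PySem.Set.contains_iff, pvMem_getD_owners]
      exact ⟨(p.1, s), hpair, rfl, hpi⟩
    · rw [pvGetD_ddict l _ hk]
      intro hnil
      have hjD : q.1 ∈ pvD l (pvKey s) := by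
        rw [pvMem_pvD]
        refine ⟨(pvKey t, (pvOwners l).getD (pvKey t) PySem.Set.empty),
          (pvMem_items_owners l _ _).mpr ⟨hk2, rfl⟩, ⟨(pvKey_subset_iff s t).mpr hss, ?_⟩, ?_⟩
        · simp only [pvKey]; exact_mod_cast hlen
        · rw [pvMem_getD_owners]
          exact ⟨(q.1, t), hpair2, rfl, rfl⟩
      have hmem : q.1 ∈ PySem.Set.diff (pvD l (pvKey s)) [i] := by
        rw [PySem.Set.mem_diff]
        exact ⟨hjD, by simpa using hne.symm⟩
      rw [hnil] at hmem
      simp at hmem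

theorem pvCond_eq (l : List (List (List String))) (p : Int × List (List String))
    (hp : p ∈ PySem.List.enumerate l) : pvCondA l p = pvCondB l p.1 := by
  by_cases h : pvCondA l p = true
  · rw [h]
    exact ((pvCondB_iff l p.1).mpr ((pvCondA_iff l p hp).mp h)).symm
  · have h2 : ¬ pvCondB l p.1 = true := fun hb => h ((pvCondA_iff l p hp).mpr ((pvCondB_iff l p.1).mp hb))
    rw [Bool.not_eq_true] at h h2
    rw [h, h2]

-- ===== VERDICT (by name: the statement is the Claim_ definition above) =====
theorem find_locations_to_remove_spec : Claim_equal_find_locations_to_remove := by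
  intro l _
  unfold Spec_find_locations_to_remove
  show find_locations_to_remove l = find_locations_to_remove_alt l
  rw [findA_eq_filter, pvAlt_eq]
  rw [List.filter_congr (fun p hp => pvCond_eq l p hp)]
  have hmap : (PySem.List.enumerate l).map (fun p => p.1) = PySem.List.pyRange 0 (l.length : Int) 1 := by
    simp [PySem.List.map_fst_enumerate]
  rw [← hmap, List.filter_map]
  rfl
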